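-- pv_equiv track=rewrite | github.com/NicGagnon/adventofcode2023 | days/1/main.py | add_first_and_last_number
-- ===== SOURCE A (Python) =====
-- def add_first_and_last_number(numbers):
--     """
--     Receive string of numbers and letters and return a combination the first digit and the last digit (in that order) to form a single two-digit number.
--     Note that the number can be spelled out so you need to account for real numbers and the english word for the number.
--     :param numbers: str
--     :return: int
--     """
--     # remove all non-numeric characters
--     number_word_to_digit_dict = {
--         "nine": 9,
--         "eight": 8,
--         "seven": 7,
--         "six": 6,
--         "five": 5,
--         "four": 4,
--         "three": 3,
--         "two": 2,
--         "one": 1,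
--         "1": 1,
--         "2": 2,
--         "3": 3,
--         "4": 4,
--         "5": 5,
--         "6": 6,
--         "7": 7,
--         "8": 8,
--         "9": 9
--     }
--     # replace occurances of words with digits
--     digits_to_insert = {}
--     for word, digit in number_word_to_digit_dict.items():
--         if (idx := numbers.find(word)) >= 0:
--             digits_to_insert[idx] = str(digit)
--         if (idx := numbers.rfind(word)) >= 0:
--             digits_to_insert[idx] = str(digit)
--     sorted_numbers = dict(sorted(digits_to_insert.items()))
--     # return the first and last digit
--     return int(sorted_numbers[min(sorted_numbers.keys())] + sorted_numbers[max(sorted_numbers.keys())])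
-- ===== SOURCE B (Python) =====
-- def add_first_and_last_number(numbers):
--     tokens = [("one", 1), ("two", 2), ("three", 3), ("four", 4), ("five", 5),
--               ("six", 6), ("seven", 7), ("eight", 8), ("nine", 9),
--               ("1", 1), ("2", 2), ("3", 3), ("4", 4), ("5", 5),
--               ("6", 6), ("7", 7), ("8", 8), ("9", 9)]
--     hits = [d for i in range(len(numbers)) for (t, d) in tokens if numbers.startswith(t, i)]
--     return hits[0] * 10 + hits[-1]
-- ===== Notes on version B (the rewrite author's own statement) =====
-- stated objective: simpler
-- what changed: A runs find and rfind for each of 18 tokens, builds an index-keyed dict, sorts it and takes min/max keys; B does a single forward scan over string positions collecting matching tokens' digits in order and returns first*10 + last.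
import Mathlib
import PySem

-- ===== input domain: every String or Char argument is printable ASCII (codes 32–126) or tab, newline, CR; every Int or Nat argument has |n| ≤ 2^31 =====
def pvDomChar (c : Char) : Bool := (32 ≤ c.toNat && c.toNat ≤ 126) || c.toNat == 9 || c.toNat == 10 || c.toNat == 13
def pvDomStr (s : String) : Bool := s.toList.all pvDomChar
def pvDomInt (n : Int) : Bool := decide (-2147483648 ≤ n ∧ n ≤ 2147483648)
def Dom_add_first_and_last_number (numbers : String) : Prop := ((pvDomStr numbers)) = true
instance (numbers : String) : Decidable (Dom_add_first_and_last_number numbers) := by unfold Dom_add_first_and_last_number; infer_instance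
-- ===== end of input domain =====

-- B replaces A's per-token find/rfind + index-keyed dict + sort + min/max keys by one
-- forward scan collecting matching tokens' digits in order (objective: simpler).

-- ===== PORT A =====
-- the items of A's number_word_to_digit_dict, in its insertion order (keys as char lists)
def pvTokensA : List (List Char × Int) :=
  [(['n','i','n','e'], 9), (['e','i','g','h','t'], 8), (['s','e','v','e','n'], 7),
   (['s','i','x'], 6), (['f','i','v','e'], 5), (['f','o','u','r'], 4),
   (['t','h','r','e','e'], 3), (['t','w','o'], 2), (['o','n','e'], 1),
   (['1'], 1), (['2'], 2), (['3'], 3), (['4'], 4), (['5'], 5),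
   (['6'], 6), (['7'], 7), (['8'], 8), (['9'], 9)]

def add_first_and_last_number (numbers : String) : Int :=
  let cs := numbers.toList
  -- for word, digit in number_word_to_digit_dict.items(): conditional inserts at find / rfind
  let digits_to_insert : PySem.Dict Int (List Char) :=
    pvTokensA.foldl (fun d wd =>
      let d1 := if PySem.Chars.find cs wd.1 ≥ 0 then d.insert (PySem.Chars.find cs wd.1) (PySem.Int.toChars wd.2) else d
      if PySem.Chars.rfind cs wd.1 ≥ 0 then d1.insert (PySem.Chars.rfind cs wd.1) (PySem.Int.toChars wd.2) else d1)
      PySem.Dict.empty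
  -- dict(sorted(digits_to_insert.items())): keys are distinct, so sorting the pairs = sorting by key
  let sorted_numbers : PySem.Dict Int (List Char) := ⟨PySem.List.sorted digits_to_insert.items (fun kv => kv.1)⟩
  -- int(sorted_numbers[min(keys)] + sorted_numbers[max(keys)]); min/max of an empty dict raises → excluded by Pre_
  match PySem.List.min? sorted_numbers.keys id, PySem.List.max? sorted_numbers.keys id with
  | some kmin, some kmax =>
    match sorted_numbers.get? kmin, sorted_numbers.get? kmax with
    | some a, some b => (PySem.Int.ofChars? (a ++ b)).getD 0
    | _, _ => 0
  | _, _ => 0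

-- ===== PORT B =====
def pvTokensB : List (List Char × Int) :=
  [(['o','n','e'], 1), (['t','w','o'], 2), (['t','h','r','e','e'], 3),
   (['f','o','u','r'], 4), (['f','i','v','e'], 5), (['s','i','x'], 6),
   (['s','e','v','e','n'], 7), (['e','i','g','h','t'], 8), (['n','i','n','e'], 9),
   (['1'], 1), (['2'], 2), (['3'], 3), (['4'], 4), (['5'], 5),
   (['6'], 6), (['7'], 7), (['8'], 8), (['9'], 9)]

def add_first_and_last_number_alt (numbers : String) : Int :=
  let cs := numbers.toList
  -- hits = [d for i in range(len(numbers)) for (t, d) in tokens if numbers.startswith(t, i)]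
  let hits := (List.range cs.length).flatMap (fun i =>
    pvTokensB.filterMap (fun td => if PySem.Chars.startswith (cs.drop i) td.1 then some td.2 else none))
  -- hits[0] * 10 + hits[-1]; IndexError on empty hits → excluded by Pre_
  match hits.head? with
  | none => 0
  | some a =>
    match hits.getLast? with
    | none => 0
    | some b => a * 10 + b

-- ===== PRECONDITION & SPEC =====
-- Pre_ excludes exactly the strings containing no digit 1-9 and no spelled digit word:
-- there A's min() over an empty dict raises ValueError (and B's hits[0] raises IndexError).
def Pre_add_first_and_last_number (numbers : String) : Prop :=
  (["one", "two", "three", "four", "five", "six", "seven", "eight", "nine",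
    "1", "2", "3", "4", "5", "6", "7", "8", "9"].any
    (fun t => PySem.Str.isIn t numbers)) = true
instance (numbers : String) : Decidable (Pre_add_first_and_last_number numbers) := by
  unfold Pre_add_first_and_last_number; infer_instance

def pvWitness_add_first_and_last_number : String := "x7eightz"

def Spec_add_first_and_last_number (numbers : String) (out : Int) : Prop := out = add_first_and_last_number_alt numbers
instance (numbers : String) (out : Int) : Decidable (Spec_add_first_and_last_number numbers out) := by unfold Spec_add_first_and_last_number; infer_instance

-- ===== CLAIM (what is proved, stated in full; the proofs are below) =====
def Claim_equal_add_first_and_last_number : Prop := ∀ (numbers : String), Dom_add_first_and_last_number numbers → Pre_add_first_and_last_number numbers → Spec_add_first_and_last_number numbers (add_first_and_last_number numbers)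


-- abbreviations for the proofs
abbrev pvMatchAt (cs : List Char) (i : Nat) : Prop :=
  (pvTokensB.any (fun td => td.1.isPrefixOf (cs.drop i))) = true

lemma pvMatchAt_iff {cs : List Char} {i : Nat} :
    pvMatchAt cs i ↔ ∃ td ∈ pvTokensB, td.1 <+: cs.drop i := by
  simp [pvMatchAt, List.any_eq_true, List.isPrefixOf_iff_prefix]

lemma pvTokA_sub_B : ∀ td ∈ pvTokensA, td ∈ pvTokensB := by decide
lemma pvTokB_sub_A : ∀ td ∈ pvTokensB, td ∈ pvTokensA := by decide

lemma pvTok_nonempty : ∀ td ∈ pvTokensB, td.1 ≠ [] := by decide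

lemma pvTok_digit_bounds : ∀ td ∈ pvTokensB, 1 ≤ td.2 ∧ td.2 ≤ 9 := by decide

lemma pvTok_prefix_eq : ∀ td1 ∈ pvTokensB, ∀ td2 ∈ pvTokensB, td1.1 <+: td2.1 → td1 = td2 := by decide

lemma pvMatcher_unique {s : List Char} {td1 td2 : List Char × Int}
    (h1 : td1 ∈ pvTokensB) (h2 : td2 ∈ pvTokensB)
    (p1 : td1.1 <+: s) (p2 : td2.1 <+: s) : td1 = td2 := by
  rcases List.prefix_or_prefix_of_prefix p1 p2 with h | h
  · exact pvTok_prefix_eq td1 h1 td2 h2 h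
  · exact (pvTok_prefix_eq td2 h2 td1 h1 h).symm

lemma pvRfind_go_cases (s sub : List Char) : ∀ j : Nat,
    (PySem.Chars.rfind.go s sub j = -1 ∧ ∀ i ≤ j, ¬ sub <+: s.drop i) ∨
    (∃ i : Nat, PySem.Chars.rfind.go s sub j = (i : Int) ∧ i ≤ j ∧ sub <+: s.drop i ∧
      ∀ i', i < i' → i' ≤ j → ¬ sub <+: s.drop i') := by
  intro j
  induction j with
  | zero =>
    have h0 : PySem.Chars.rfind.go s sub 0 = if sub.isPrefixOf s then (0 : Int) else -1 := rfl
    by_cases hp : sub <+: s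
    · right; refine ⟨0, ?_, le_refl _, by simpa using hp, by omega⟩
      rw [h0]; simp [List.isPrefixOf_iff_prefix, hp]
    · left
      constructor
      · rw [h0]; simp [List.isPrefixOf_iff_prefix, hp]
      · intro i hi; interval_cases i; simpa using hp
  | succ j ih =>
    have hs : PySem.Chars.rfind.go s sub (j+1) =
        if sub.isPrefixOf (s.drop (j+1)) then ((j+1 : Nat) : Int) else PySem.Chars.rfind.go s sub j := rfl
    by_cases hp : sub <+: s.drop (j+1)
    · right
      refine ⟨j+1, ?_, le_refl _, hp, by omega⟩
      rw [hs]; simp [List.isPrefixOf_iff_prefix, hp]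
    · have hgo : PySem.Chars.rfind.go s sub (j+1) = PySem.Chars.rfind.go s sub j := by
        rw [hs]; simp [List.isPrefixOf_iff_prefix, hp]
      rcases ih with ⟨h1, h2⟩ | ⟨i, h1, h2, h3, h4⟩
      · left
        refine ⟨by rw [hgo, h1], ?_⟩
        intro i hi
        rcases Nat.lt_or_ge i (j+1) with h | h
        · exact h2 i (by omega)
        · have : i = j + 1 := by omega
          subst this; exact hp
      · right
        refine ⟨i, by rw [hgo, h1], by omega, h3, ?_⟩
        intro i' hi1 hi2
        rcases Nat.lt_or_ge i' (j+1) with h | h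
        · exact h4 i' hi1 (by omega)
        · have : i' = j + 1 := by omega
          subst this; exact hp

lemma pvFilterMap_eq_singleton {α β : Type} {p : α → Option β} :
    ∀ {l : List α} {a : α} {b : β}, l.Nodup → a ∈ l → p a = some b →
      (∀ x ∈ l, p x ≠ none → x = a) → l.filterMap p = [b] := by
  intro l
  induction l with
  | nil => intro a b _ h; simp at h
  | cons x xs ih =>
    intro a b hnd hmem hpa huniq
    rcases List.nodup_cons.mp hnd with ⟨hx_notin, hnd'⟩
    rcases List.mem_cons.mp hmem with rfl | hmem'
    · have hxs : ∀ y ∈ xs, p y = none := by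
        intro y hy
        by_contra hne
        have heq := huniq y (List.mem_cons_of_mem _ hy) hne
        exact hx_notin (heq ▸ hy)
      have hnil : xs.filterMap p = [] := List.filterMap_eq_nil_iff.mpr hxs
      simp [hpa, hnil]
    · have hpx : p x = none := by
        by_contra hne
        have heq := huniq x (List.mem_cons_self) hne
        exact hx_notin (heq ▸ hmem')
      have := ih hnd' hmem' hpa (fun y hy hne => huniq y (List.mem_cons_of_mem _ hy) hne)
      simp [hpx, this]

def pvF (cs : List Char) (i : Nat) : List Int :=
  pvTokensB.filterMap (fun td => if PySem.Chars.startswith (cs.drop i) td.1 then some td.2 else none)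

lemma pvTokB_nodup : pvTokensB.Nodup := by decide

lemma pvF_eq_nil {cs : List Char} {i : Nat} (h : ¬ pvMatchAt cs i) : pvF cs i = [] := by
  apply List.filterMap_eq_nil_iff.mpr
  intro td htd
  have : ¬ td.1 <+: cs.drop i := fun hp => h (pvMatchAt_iff.mpr ⟨td, htd, hp⟩)
  simp [PySem.Chars.startswith, List.isPrefixOf_iff_prefix, this]

lemma pvF_eq_singleton {cs : List Char} {i : Nat} {td : List Char × Int}
    (htd : td ∈ pvTokensB) (hp : td.1 <+: cs.drop i) : pvF cs i = [td.2] := by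
  apply pvFilterMap_eq_singleton pvTokB_nodup htd
  · simp [PySem.Chars.startswith, List.isPrefixOf_iff_prefix, hp]
  · intro x hx hne
    have hpx : x.1 <+: cs.drop i := by
      by_contra hq
      simp [PySem.Chars.startswith, List.isPrefixOf_iff_prefix, hq] at hne
    exact pvMatcher_unique hx htd hpx hp

lemma pvMatchAt_lt_length {cs : List Char} {i : Nat} (h : pvMatchAt cs i) : i < cs.length := by
  rcases pvMatchAt_iff.mp h with ⟨td, htd, hp⟩
  have hne := pvTok_nonempty td htd
  by_contra hge
  have : cs.drop i = [] := List.drop_eq_nil_iff.mpr (by omega)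
  rw [this] at hp
  exact hne (List.prefix_nil.mp hp)

def pvHits (cs : List Char) : List Int := (List.range cs.length).flatMap (pvF cs)

lemma pvAlt_eq (numbers : String) :
    add_first_and_last_number_alt numbers =
      match (pvHits numbers.toList).head? with
      | none => 0
      | some a =>
        match (pvHits numbers.toList).getLast? with
        | none => 0
        | some b => a * 10 + b := rfl

lemma pvHits_head {cs : List Char} (hex : ∃ i, pvMatchAt cs i) {td : List Char × Int}
    (htd : td ∈ pvTokensB) (hp : td.1 <+: cs.drop (Nat.find hex)) :
    (pvHits cs).head? = some td.2 := by
  set n := cs.length with hn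
  set m := Nat.find hex with hm
  have hmlt : m < n := pvMatchAt_lt_length (Nat.find_spec hex)
  have hsplit : n = m + (n - m) := by omega
  have hrange : List.range n = List.range m ++ (List.range (n - m)).map (m + ·) := by
    conv_lhs => rw [hsplit]
    exact List.range_add
  have hnil : (List.range m).flatMap (pvF cs) = [] := by
    apply List.flatMap_eq_nil_iff.mpr
    intro i hi
    exact pvF_eq_nil (Nat.find_min hex (List.mem_range.mp hi))
  have ht : n - m = (n - m - 1) + 1 := by omega
  have hFm : pvF cs m = [td.2] := pvF_eq_singleton htd hp
  rw [pvHits, hrange, List.flatMap_append, hnil, List.nil_append, ht,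
    List.range_succ_eq_map, List.map_cons, List.flatMap_cons]
  simp [hFm]

lemma pvHits_last {cs : List Char} (hex : ∃ i, pvMatchAt cs i) {td : List Char × Int}
    (htd : td ∈ pvTokensB)
    (hp : td.1 <+: cs.drop (Nat.findGreatest (pvMatchAt cs) cs.length)) :
    (pvHits cs).getLast? = some td.2 := by
  set n := cs.length with hn
  set M := Nat.findGreatest (pvMatchAt cs) n with hM
  have hMP : pvMatchAt cs M := by
    obtain ⟨i, hi⟩ := hex
    exact Nat.findGreatest_spec (le_of_lt (pvMatchAt_lt_length hi)) hi
  have hMlt : M < n := pvMatchAt_lt_length hMP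
  have hsplit : n = (M + 1) + (n - M - 1) := by omega
  have hrange : List.range n = List.range (M + 1) ++ (List.range (n - M - 1)).map ((M + 1) + ·) := by
    conv_lhs => rw [hsplit]
    exact List.range_add
  have hnil : ((List.range (n - M - 1)).map ((M + 1) + ·)).flatMap (pvF cs) = [] := by
    apply List.flatMap_eq_nil_iff.mpr
    intro i hi
    simp only [List.mem_map, List.mem_range] at hi
    obtain ⟨j, hj, rfl⟩ := hi
    exact pvF_eq_nil (Nat.findGreatest_is_greatest (P := pvMatchAt cs) (n := n) (by omega) (by omega))
  have hFM : pvF cs M = [td.2] := pvF_eq_singleton htd hp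
  rw [pvHits, hrange, List.flatMap_append, hnil, List.append_nil, List.range_succ,
    List.flatMap_append, List.flatMap_cons, List.flatMap_nil, List.append_nil, hFM,
    List.getLast?_concat]

def pvStep (cs : List Char) (d : PySem.Dict Int (List Char)) (wd : List Char × Int) :
    PySem.Dict Int (List Char) :=
  let d1 := if PySem.Chars.find cs wd.1 ≥ 0 then d.insert (PySem.Chars.find cs wd.1) (PySem.Int.toChars wd.2) else d
  if PySem.Chars.rfind cs wd.1 ≥ 0 then d1.insert (PySem.Chars.rfind cs wd.1) (PySem.Int.toChars wd.2) else d1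

def pvGood (cs : List Char) (kv : Int × List Char) : Prop :=
  ∃ td ∈ pvTokensB, ∃ i : Nat, kv.1 = (i : Int) ∧ td.1 <+: cs.drop i ∧ kv.2 = PySem.Int.toChars td.2

-- the pair inserted at find cs wd.1 is good
lemma pvGood_find {cs : List Char} {wd : List Char × Int} (hwd : wd ∈ pvTokensA)
    (h : PySem.Chars.find cs wd.1 ≥ 0) :
    pvGood cs (PySem.Chars.find cs wd.1, PySem.Int.toChars wd.2) := by
  obtain ⟨hp, -⟩ := PySem.Chars.find_spec h
  exact ⟨wd, pvTokA_sub_B wd hwd, (PySem.Chars.find cs wd.1).toNat, (Int.toNat_of_nonneg h).symm, hp, rfl⟩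

lemma pvRfind_spec {cs : List Char} {w : List Char} (h : PySem.Chars.rfind cs w ≥ 0) :
    ∃ i : Nat, PySem.Chars.rfind cs w = (i : Int) ∧ i ≤ cs.length ∧ w <+: cs.drop i ∧
      ∀ i', i < i' → i' ≤ cs.length → ¬ w <+: cs.drop i' := by
  rcases pvRfind_go_cases cs w cs.length with ⟨h1, -⟩ | ⟨i, h1, h2, h3, h4⟩
  · rw [PySem.Chars.rfind] at h; omega
  · exact ⟨i, h1, h2, h3, h4⟩

lemma pvGood_rfind {cs : List Char} {wd : List Char × Int} (hwd : wd ∈ pvTokensA)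
    (h : PySem.Chars.rfind cs wd.1 ≥ 0) :
    pvGood cs (PySem.Chars.rfind cs wd.1, PySem.Int.toChars wd.2) := by
  obtain ⟨i, h1, -, hp, -⟩ := pvRfind_spec h
  exact ⟨wd, pvTokA_sub_B wd hwd, i, h1, hp, rfl⟩

-- every item of the dict A builds is good
lemma pvFoldl_good (cs : List Char) :
    ∀ (l : List (List Char × Int)) (d : PySem.Dict Int (List Char)),
      (∀ td ∈ l, td ∈ pvTokensA) → (∀ kv ∈ d.items, pvGood cs kv) →
      ∀ kv ∈ (l.foldl (pvStep cs) d).items, pvGood cs kv := by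
  intro l
  induction l with
  | nil => intro d _ hd kv h; exact hd kv h
  | cons wd rest ih =>
    intro d hl hd kv hkv
    refine ih _ (fun td h => hl td (List.mem_cons_of_mem _ h)) ?_ kv hkv
    intro p hp
    have hwd : wd ∈ pvTokensA := hl wd List.mem_cons_self
    unfold pvStep at hp
    dsimp only at hp
    split at hp
    · rcases (PySem.Dict.mem_items_insert _ _ _ p).mp hp with rfl | ⟨hp', -⟩
      · exact pvGood_rfind hwd (by assumption)
      · split at hp'
        · rcases (PySem.Dict.mem_items_insert _ _ _ p).mp hp' with rfl | ⟨hp'', -⟩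
          · exact pvGood_find hwd (by assumption)
          · exact hd p hp''
        · exact hd p hp'
    · split at hp
      · rcases (PySem.Dict.mem_items_insert _ _ _ p).mp hp with rfl | ⟨hp'', -⟩
        · exact pvGood_find hwd (by assumption)
        · exact hd p hp''
      · exact hd p hp

def pvDictA (cs : List Char) : PySem.Dict Int (List Char) :=
  pvTokensA.foldl (pvStep cs) PySem.Dict.empty

lemma pvStep_contains {cs : List Char} (d : PySem.Dict Int (List Char)) (wd : List Char × Int)
    {k : Int} (h : d.contains k = true) : (pvStep cs d wd).contains k = true := by
  unfold pvStep
  dsimp only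
  split <;> split <;> simp [PySem.Dict.contains_insert, h]

lemma pvContains_mono {cs : List Char} {k : Int} :
    ∀ (l : List (List Char × Int)) (d : PySem.Dict Int (List Char)),
      d.contains k = true → (l.foldl (pvStep cs) d).contains k = true := by
  intro l
  induction l with
  | nil => intro d h; exact h
  | cons wd rest ih => intro d h; exact ih _ (pvStep_contains d wd h)

lemma pvDictA_contains_find {cs : List Char} {wd : List Char × Int} (hwd : wd ∈ pvTokensA)
    (h : PySem.Chars.find cs wd.1 ≥ 0) :
    (pvDictA cs).contains (PySem.Chars.find cs wd.1) = true := by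
  obtain ⟨l1, l2, heq⟩ := List.append_of_mem hwd
  unfold pvDictA
  rw [heq, List.foldl_append, List.foldl_cons]
  apply pvContains_mono
  have h1 : ((l1.foldl (pvStep cs) PySem.Dict.empty).insert (PySem.Chars.find cs wd.1)
      (PySem.Int.toChars wd.2)).contains (PySem.Chars.find cs wd.1) = true := by
    simp
  unfold pvStep
  dsimp only
  rw [if_pos h]
  split
  · simp [PySem.Dict.contains_insert]
  · exact h1

lemma pvDictA_contains_rfind {cs : List Char} {wd : List Char × Int} (hwd : wd ∈ pvTokensA)
    (h : PySem.Chars.rfind cs wd.1 ≥ 0) :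
    (pvDictA cs).contains (PySem.Chars.rfind cs wd.1) = true := by
  obtain ⟨l1, l2, heq⟩ := List.append_of_mem hwd
  unfold pvDictA
  rw [heq, List.foldl_append, List.foldl_cons]
  apply pvContains_mono
  unfold pvStep
  dsimp only
  rw [if_pos h]
  simp

lemma pvDictA_good {cs : List Char} : ∀ kv ∈ (pvDictA cs).items, pvGood cs kv :=
  pvFoldl_good cs pvTokensA PySem.Dict.empty (fun td h => h) (by simp [PySem.Dict.empty])

lemma pvInfix_of_prefix_drop {sub cs : List Char} {i : Nat} (h : sub <+: cs.drop i) :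
    sub <:+: cs :=
  h.isInfix.trans (List.drop_suffix i cs).isInfix

lemma pvFind_eq {cs : List Char} (hex : ∃ i, pvMatchAt cs i) {td : List Char × Int}
    (htd : td ∈ pvTokensB) (hp : td.1 <+: cs.drop (Nat.find hex)) :
    PySem.Chars.find cs td.1 = ((Nat.find hex : Nat) : Int) := by
  have hnn : 0 ≤ PySem.Chars.find cs td.1 :=
    (PySem.Chars.find_nonneg_iff cs td.1).mpr (pvInfix_of_prefix_drop hp)
  obtain ⟨hpf, hmin⟩ := PySem.Chars.find_spec hnn
  have h1 : Nat.find hex ≤ (PySem.Chars.find cs td.1).toNat :=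
    Nat.find_min' hex (pvMatchAt_iff.mpr ⟨td, htd, hpf⟩)
  have h2 : ¬ (Nat.find hex < (PySem.Chars.find cs td.1).toNat) := fun hlt => hmin _ hlt hp
  omega

lemma pvRfind_eq {cs : List Char} {td : List Char × Int}
    (htd : td ∈ pvTokensB)
    (hp : td.1 <+: cs.drop (Nat.findGreatest (pvMatchAt cs) cs.length)) :
    PySem.Chars.rfind cs td.1 = ((Nat.findGreatest (pvMatchAt cs) cs.length : Nat) : Int) := by
  set M := Nat.findGreatest (pvMatchAt cs) cs.length with hM
  have hMn : M ≤ cs.length := Nat.findGreatest_le cs.length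
  rcases pvRfind_go_cases cs td.1 cs.length with ⟨-, h2⟩ | ⟨i, h1, h2, h3, h4⟩
  · exact absurd hp (h2 M hMn)
  · have hiM : i ≤ M := Nat.le_findGreatest (by omega) (pvMatchAt_iff.mpr ⟨td, htd, h3⟩)
    have hMi : ¬ (i < M) := fun hlt => h4 M hlt hMn hp
    have hgo : PySem.Chars.rfind cs td.1 = PySem.Chars.rfind.go cs td.1 cs.length := rfl
    rw [hgo, h1]
    omega

def pvSortedA (cs : List Char) : PySem.Dict Int (List Char) :=
  ⟨PySem.List.sorted (pvDictA cs).items (fun kv => kv.1)⟩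

lemma pvA_eq (numbers : String) :
    add_first_and_last_number numbers =
      match PySem.List.min? (pvSortedA numbers.toList).keys id,
            PySem.List.max? (pvSortedA numbers.toList).keys id with
      | some kmin, some kmax =>
        match (pvSortedA numbers.toList).get? kmin, (pvSortedA numbers.toList).get? kmax with
        | some a, some b => (PySem.Int.ofChars? (a ++ b)).getD 0
        | _, _ => 0
      | _, _ => 0 := rfl

lemma pvSorted_items_perm (cs : List Char) :
    (pvSortedA cs).items.Perm (pvDictA cs).items :=
  PySem.List.sorted_perm _ _ _

lemma pvSorted_keys_mem {cs : List Char} {k : Int} :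
    k ∈ (pvSortedA cs).keys ↔ k ∈ (pvDictA cs).keys := by
  constructor <;> intro h
  · exact List.Perm.mem_iff ((pvSorted_items_perm cs).map Prod.fst) |>.mp h
  · exact List.Perm.mem_iff ((pvSorted_items_perm cs).map Prod.fst) |>.mpr h

lemma pvSorted_good {cs : List Char} {kv : Int × List Char}
    (h : kv ∈ (pvSortedA cs).items) : pvGood cs kv :=
  pvDictA_good _ ((pvSorted_items_perm cs).mem_iff.mp h)

lemma pvKey_good {cs : List Char} {k : Int} (hk : k ∈ (pvSortedA cs).keys) :
    ∃ i : Nat, k = (i : Int) ∧ pvMatchAt cs i := by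
  rcases List.mem_map.mp hk with ⟨kv, hkv, rfl⟩
  obtain ⟨td, htd, i, h1, h2, -⟩ := pvSorted_good hkv
  exact ⟨i, h1, pvMatchAt_iff.mpr ⟨td, htd, h2⟩⟩

lemma pvDigitArith : ∀ a b : Int, 1 ≤ a → a ≤ 9 → 1 ≤ b → b ≤ 9 →
    (PySem.Int.ofChars? (PySem.Int.toChars a ++ PySem.Int.toChars b)).getD 0 = a * 10 + b := by
  intro a b ha1 ha2 hb1 hb2
  interval_cases a <;> interval_cases b <;> decide

lemma pvPre_ex {numbers : String} (h : Pre_add_first_and_last_number numbers) :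
    ∃ i, pvMatchAt numbers.toList i := by
  unfold Pre_add_first_and_last_number at h
  rw [List.any_eq_true] at h
  obtain ⟨t, ht, hin⟩ := h
  have htok : ∃ td ∈ pvTokensB, td.1 = t.toList := by
    fin_cases ht <;> decide
  obtain ⟨td, htd, hteq⟩ := htok
  have hinf : t.toList <:+: numbers.toList := (PySem.Str.isIn_iff_infix t numbers).mp hin
  have : PySem.Chars.isIn t.toList numbers.toList = true :=
    (PySem.Chars.isIn_iff_infix _ _).mpr hinf
  obtain ⟨j, hj⟩ := (PySem.Chars.exists_prefix_drop_iff_isIn t.toList numbers.toList).mpr this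
  exact ⟨j, pvMatchAt_iff.mpr ⟨td, htd, hteq ▸ hj⟩⟩

lemma pvMin_eq {cs : List Char} (hex : ∃ i, pvMatchAt cs i)
    (hm : ((Nat.find hex : Nat) : Int) ∈ (pvSortedA cs).keys) :
    PySem.List.min? (pvSortedA cs).keys id = some ((Nat.find hex : Nat) : Int) := by
  cases hk0 : PySem.List.min? (pvSortedA cs).keys id with
  | none =>
    rw [PySem.List.min?_eq_none_iff] at hk0
    rw [hk0] at hm
    simp at hm
  | some k0 =>
    have hmem := PySem.List.min?_mem hk0
    obtain ⟨i, rfl, hi⟩ := pvKey_good hmem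
    have h1 : Nat.find hex ≤ i := Nat.find_min' hex hi
    have h2 : (i : Int) ≤ ((Nat.find hex : Nat) : Int) := PySem.List.min?_isMin hk0 _ hm
    congr 1
    omega

lemma pvMax_eq {cs : List Char}
    (hM : ((Nat.findGreatest (pvMatchAt cs) cs.length : Nat) : Int) ∈ (pvSortedA cs).keys) :
    PySem.List.max? (pvSortedA cs).keys id =
      some ((Nat.findGreatest (pvMatchAt cs) cs.length : Nat) : Int) := by
  cases hk0 : PySem.List.max? (pvSortedA cs).keys id with
  | none =>
    rw [PySem.List.max?_eq_none_iff] at hk0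
    rw [hk0] at hM
    simp at hM
  | some k0 =>
    have hmem := PySem.List.max?_mem hk0
    obtain ⟨i, rfl, hi⟩ := pvKey_good hmem
    have hilt : i < cs.length := pvMatchAt_lt_length hi
    have h1 : i ≤ Nat.findGreatest (pvMatchAt cs) cs.length := Nat.le_findGreatest (by omega) hi
    have h2 : ((Nat.findGreatest (pvMatchAt cs) cs.length : Nat) : Int) ≤ (i : Int) :=
      PySem.List.max?_isMax hk0 _ hM
    congr 1
    omega

lemma pvSorted_get {cs : List Char} {i : Nat} {td : List Char × Int}
    (htd : td ∈ pvTokensB) (hp : td.1 <+: cs.drop i)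
    (hm : ((i : Nat) : Int) ∈ (pvSortedA cs).keys) :
    (pvSortedA cs).get? (i : Int) = some (PySem.Int.toChars td.2) := by
  have hcont : (pvSortedA cs).contains (i : Int) = true :=
    (PySem.Dict.contains_iff_mem_keys _ _).mpr hm
  rw [PySem.Dict.contains_eq_isSome_get?] at hcont
  cases hv : (pvSortedA cs).get? (i : Int) with
  | none => rw [hv] at hcont; simp at hcont
  | some v =>
    obtain ⟨td', htd', i', h1, h2, h3⟩ :=
      pvSorted_good (PySem.Dict.mem_items_of_get?_eq_some _ hv)
    have hii : i = i' := by omega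
    subst hii
    have heq : td' = td := pvMatcher_unique htd' htd h2 hp
    dsimp only at h3
    rw [h3, heq]

-- ===== VERDICT (by name: the statement is the Claim_ definition above) =====
theorem add_first_and_last_number_spec : Claim_equal_add_first_and_last_number := by
  intro numbers _ hpre
  unfold Spec_add_first_and_last_number
  have hex : ∃ i, pvMatchAt numbers.toList i := pvPre_ex hpre
  set cs := numbers.toList with hcs
  set m := Nat.find hex with hmdef
  set M := Nat.findGreatest (pvMatchAt cs) cs.length with hMdef
  obtain ⟨tdm, htdm, hpm⟩ := pvMatchAt_iff.mp (Nat.find_spec hex)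
  have hMP : pvMatchAt cs M := by
    obtain ⟨i, hi⟩ := hex
    exact Nat.findGreatest_spec (le_of_lt (pvMatchAt_lt_length hi)) hi
  obtain ⟨tdM, htdM, hpM⟩ := pvMatchAt_iff.mp hMP
  -- memberships in the sorted dict's keys
  have hfind : PySem.Chars.find cs tdm.1 = ((m : Nat) : Int) := pvFind_eq hex htdm hpm
  have hrfind : PySem.Chars.rfind cs tdM.1 = ((M : Nat) : Int) := pvRfind_eq htdM hpM
  have hmmem : ((m : Nat) : Int) ∈ (pvSortedA cs).keys := by
    rw [pvSorted_keys_mem, ← PySem.Dict.contains_iff_mem_keys, ← hfind]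
    exact pvDictA_contains_find (pvTokB_sub_A tdm htdm) (by rw [hfind]; positivity)
  have hMmem : ((M : Nat) : Int) ∈ (pvSortedA cs).keys := by
    rw [pvSorted_keys_mem, ← PySem.Dict.contains_iff_mem_keys, ← hrfind]
    exact pvDictA_contains_rfind (pvTokB_sub_A tdM htdM) (by rw [hrfind]; positivity)
  -- evaluate both sides
  rw [pvA_eq, pvAlt_eq, ← hcs]
  rw [pvHits_head hex htdm hpm, pvHits_last hex htdM hpM]
  rw [pvMin_eq hex hmmem, pvMax_eq hMmem]
  dsimp only
  rw [pvSorted_get htdm hpm hmmem, pvSorted_get htdM hpM hMmem]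
  have hbm := pvTok_digit_bounds tdm htdm
  have hbM := pvTok_digit_bounds tdM htdM
  simpa using pvDigitArith tdm.2 tdM.2 hbm.1 hbm.2 hbM.1 hbM.2
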